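-- pv_equiv track=rewrite | github.com/YehorFeshchenko/barcodes-project | server/services/barcodeService.py | decode_full_ascii
-- ===== SOURCE A (Python) =====
-- full_ascii_map = {
--     ' ': '/A', '!': '/B', '"': '/C', '#': '/D', '$': '/E', '%': '/F', '&': '/G', '\'': '/H', '(': '/I', ')': '/J',
--     '*': '/K', '+': '/L', ',': '/M', '-': '/N', '.': '/O', '/': '/P', '0': '0', '1': '1', '2': '2', '3': '3',
--     '4': '4', '5': '5', '6': '6', '7': '7', '8': '8', '9': '9', ':': '/Z', ';': '%F', '<': '%G', '=': '%H',
--     '>': '%I', '?': '%J', '@': '%V', 'A': 'A', 'B': 'B', 'C': 'C', 'D': 'D', 'E': 'E', 'F': 'F', 'G': 'G',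
--     'H': 'H', 'I': 'I', 'J': 'J', 'K': 'K', 'L': 'L', 'M': 'M', 'N': 'N', 'O': 'O', 'P': 'P', 'Q': 'Q',
--     'R': 'R', 'S': 'S', 'T': 'T', 'U': 'U', 'V': 'V', 'W': 'W', 'X': 'X', 'Y': 'Y', 'Z': 'Z', '[': '%K',
--     '\\': '%L', ']': '%M', '^': '%N', '_': '%O', '`': '%W', 'a': '+A', 'b': '+B', 'c': '+C', 'd': '+D',
--     'e': '+E', 'f': '+F', 'g': '+G', 'h': '+H', 'i': '+I', 'j': '+J', 'k': '+K', 'l': '+L', 'm': '+M',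
--     'n': '+N', 'o': '+O', 'p': '+P', 'q': '+Q', 'r': '+R', 's': '+S', 't': '+T', 'u': '+U', 'v': '+V',
--     'w': '+W', 'x': '+X', 'y': '+Y', 'z': '+Z', '{': '%P', '|': '%Q', '}': '%R', '~': '%S'
-- }
--
-- def decode_full_ascii(encoded_string):
--     # Reverse mapping for Full ASCII Code 39
--     reverse_full_ascii_map = {v: k for k, v in full_ascii_map.items()}
--
--     decoded_string = ''
--     i = 0
--     while i < len(encoded_string):
--         if encoded_string[i] in reverse_full_ascii_map:
--             # Single character mapping
--             decoded_string += reverse_full_ascii_map[encoded_string[i]]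
--             i += 1
--         elif i + 1 < len(encoded_string) and encoded_string[i:i + 2] in reverse_full_ascii_map:
--             # Double character mapping
--             decoded_string += reverse_full_ascii_map[encoded_string[i:i + 2]]
--             i += 2
--         else:
--             # Character not found in mapping
--             decoded_string += '?'
--             i += 1
--
--     return decoded_string
-- ===== SOURCE B (Python) =====
-- # Arithmetic Code-39 full-ASCII decoder: instead of building/reversing a table,
-- # classify each token by character-range arithmetic (Code 39's shift structure).
--
-- def _decode_pair(shift, c):
--     # Decode a two-character token shift+c, or None if it is not a valid token.
--     if shift == '/':
--         if 'A' <= c <= 'P':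
--             return chr(ord(c) - 33)       # '/A'..'/P' -> ' '..'/'
--         if c == 'Z':
--             return ':'
--     elif shift == '%':
--         if 'F' <= c <= 'J':
--             return chr(ord(c) - 11)       # '%F'..'%J' -> ';'..'?'
--         if c == 'V':
--             return '@'
--         if 'K' <= c <= 'O':
--             return chr(ord(c) + 16)       # '%K'..'%O' -> '['..'_'
--         if c == 'W':
--             return '`'
--         if 'P' <= c <= 'S':
--             return chr(ord(c) + 43)       # '%P'..'%S' -> '{'..'~'
--     elif shift == '+':
--         if 'A' <= c <= 'Z':
--             return chr(ord(c) + 32)       # '+A'..'+Z' -> 'a'..'z'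
--     return None
--
--
-- def decode_full_ascii(encoded_string):
--     out = []
--     n = len(encoded_string)
--     i = 0
--     while i < n:
--         c = encoded_string[i]
--         if '0' <= c <= '9' or 'A' <= c <= 'Z':
--             out.append(c)
--             i += 1
--         else:
--             d = _decode_pair(c, encoded_string[i + 1]) if i + 1 < n else None
--             if d is not None:
--                 out.append(d)
--                 i += 2
--             else:
--                 out.append('?')
--                 i += 1
--     return ''.join(out)
-- ===== Notes on version B (the rewrite author's own statement) =====
-- stated objective: faster
-- what changed: A rebuilds a reverse dictionary on every call and decodes by dict lookups on one- and two-character slices with string += accumulation; B drops the table entirely and decodes each token by character-range arithmetic (chr/ord offsets exploiting Code 39's contiguous shift blocks), appending to a list joined once.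
import Mathlib
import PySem

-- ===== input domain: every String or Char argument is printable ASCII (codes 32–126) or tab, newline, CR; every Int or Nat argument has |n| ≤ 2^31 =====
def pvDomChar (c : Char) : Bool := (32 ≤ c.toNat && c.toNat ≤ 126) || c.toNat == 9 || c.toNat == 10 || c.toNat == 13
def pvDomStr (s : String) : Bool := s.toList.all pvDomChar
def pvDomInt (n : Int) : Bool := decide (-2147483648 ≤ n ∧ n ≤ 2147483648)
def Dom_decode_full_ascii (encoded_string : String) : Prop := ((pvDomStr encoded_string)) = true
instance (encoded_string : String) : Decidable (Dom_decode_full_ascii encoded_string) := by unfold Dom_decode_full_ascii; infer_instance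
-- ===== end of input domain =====

-- B replaces A's per-call reverse-dictionary build and slice lookups by a table-free
-- decoder that classifies each token with character-range arithmetic (objective: faster; the
-- timing run measured B faster on large inputs).

set_option maxRecDepth 100000

-- ===== PORT A =====
-- module-level constant full_ascii_map (A's context)
def fullAsciiMap : PySem.Dict String String := PySem.Dict.ofList [
    (" ", "/A"), ("!", "/B"), ("\"", "/C"), ("#", "/D"), ("$", "/E"), ("%", "/F"),
    ("&", "/G"), ("'", "/H"), ("(", "/I"), (")", "/J"), ("*", "/K"), ("+", "/L"),
    (",", "/M"), ("-", "/N"), (".", "/O"), ("/", "/P"), ("0", "0"), ("1", "1"),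
    ("2", "2"), ("3", "3"), ("4", "4"), ("5", "5"), ("6", "6"), ("7", "7"),
    ("8", "8"), ("9", "9"), (":", "/Z"), (";", "%F"), ("<", "%G"), ("=", "%H"),
    (">", "%I"), ("?", "%J"), ("@", "%V"), ("A", "A"), ("B", "B"), ("C", "C"),
    ("D", "D"), ("E", "E"), ("F", "F"), ("G", "G"), ("H", "H"), ("I", "I"),
    ("J", "J"), ("K", "K"), ("L", "L"), ("M", "M"), ("N", "N"), ("O", "O"),
    ("P", "P"), ("Q", "Q"), ("R", "R"), ("S", "S"), ("T", "T"), ("U", "U"),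
    ("V", "V"), ("W", "W"), ("X", "X"), ("Y", "Y"), ("Z", "Z"), ("[", "%K"),
    ("\\", "%L"), ("]", "%M"), ("^", "%N"), ("_", "%O"), ("`", "%W"), ("a", "+A"),
    ("b", "+B"), ("c", "+C"), ("d", "+D"), ("e", "+E"), ("f", "+F"), ("g", "+G"),
    ("h", "+H"), ("i", "+I"), ("j", "+J"), ("k", "+K"), ("l", "+L"), ("m", "+M"),
    ("n", "+N"), ("o", "+O"), ("p", "+P"), ("q", "+Q"), ("r", "+R"), ("s", "+S"),
    ("t", "+T"), ("u", "+U"), ("v", "+V"), ("w", "+W"), ("x", "+X"), ("y", "+Y"),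
    ("z", "+Z"), ("{", "%P"), ("|", "%Q"), ("}", "%R"), ("~", "%S")
]

-- reverse_full_ascii_map = {v: k for k, v in full_ascii_map.items()}  (built inside A)
def revA : PySem.Dict String String :=
  fullAsciiMap.items.foldl (fun d kv => d.insert kv.2 kv.1) PySem.Dict.empty

-- the while loop: i is the position, modelled by the remaining character list
def loopA : List Char → List Char
  | [] => []
  | c :: rest =>
    if revA.contains (String.ofList [c]) then
      (revA.getD (String.ofList [c]) "").toList ++ loopA rest
    else
      match rest with
      | d :: rest' =>
        if revA.contains (String.ofList [c, d]) then
          (revA.getD (String.ofList [c, d]) "").toList ++ loopA rest'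
        else
          '?' :: loopA (d :: rest')
      | [] => '?' :: loopA []

def decode_full_ascii (encoded_string : String) : String :=
  String.ofList (loopA encoded_string.toList)

-- ===== PORT B =====
-- _decode_pair(shift, c): decode a two-character token by range arithmetic, None if invalid
def decodePairB (shift c : Char) : Option Char :=
  if shift = '/' then
    if 'A' ≤ c ∧ c ≤ 'P' then some (Char.ofNat (c.toNat - 33))
    else if c = 'Z' then some ':'
    else none
  else if shift = '%' then
    if 'F' ≤ c ∧ c ≤ 'J' then some (Char.ofNat (c.toNat - 11))
    else if c = 'V' then some '@'
    else if 'K' ≤ c ∧ c ≤ 'O' then some (Char.ofNat (c.toNat + 16))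
    else if c = 'W' then some '`'
    else if 'P' ≤ c ∧ c ≤ 'S' then some (Char.ofNat (c.toNat + 43))
    else none
  else if shift = '+' then
    if 'A' ≤ c ∧ c ≤ 'Z' then some (Char.ofNat (c.toNat + 32))
    else none
  else none

-- B's while loop over the remaining characters
def loopB : List Char → List Char
  | [] => []
  | c :: rest =>
    if ('0' ≤ c ∧ c ≤ '9') ∨ ('A' ≤ c ∧ c ≤ 'Z') then
      c :: loopB rest
    else
      match rest with
      | [] => '?' :: loopB []
      | d :: rest' =>
        match decodePairB c d with
        | some x => x :: loopB rest'
        | none => '?' :: loopB (d :: rest')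

def decode_full_ascii_alt (encoded_string : String) : String :=
  String.ofList (loopB encoded_string.toList)

-- ===== PRECONDITION & SPEC =====
def Spec_decode_full_ascii (encoded_string : String) (out : String) : Prop := out = decode_full_ascii_alt encoded_string
instance (encoded_string : String) (out : String) : Decidable (Spec_decode_full_ascii encoded_string out) := by unfold Spec_decode_full_ascii; infer_instance

-- ===== CLAIM (what is proved, stated in full; the proofs are below) =====
def Claim_equal_decode_full_ascii : Prop := ∀ (encoded_string : String), Dom_decode_full_ascii encoded_string → Spec_decode_full_ascii encoded_string (decode_full_ascii encoded_string)

-- ===== LEMMAS AND PROOFS =====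

-- a character of the domain is Char.ofNat of one of these 98 codes
def domNatList : List Nat := [9, 10, 13] ++ List.range' 32 95

theorem dom_char_cases (c : Char) (h : pvDomChar c = true) (P : Char → Prop)
    (hp : ∀ n ∈ domNatList, P (Char.ofNat n)) : P c := by
  have hc : Char.ofNat c.toNat = c := Char.ofNat_toNat c
  have hmem : c.toNat ∈ domNatList := by
    simp only [pvDomChar, Bool.or_eq_true, Bool.and_eq_true, decide_eq_true_eq,
      beq_iff_eq] at h
    simp only [domNatList, List.mem_append, List.mem_range'_1, List.mem_cons,
      List.not_mem_nil, or_false]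
    omega
  have := hp c.toNat hmem
  rwa [hc] at this

-- the reverse map A builds, written out (proof apparatus only; checked by `decide`)
def revLit : PySem.Dict String String := PySem.Dict.mk [("/A", " "), ("/B", "!"), ("/C", "\""), ("/D", "#"), ("/E", "$"), ("/F", "%"), ("/G", "&"), ("/H", "'"), ("/I", "("), ("/J", ")"), ("/K", "*"), ("/L", "+"), ("/M", ","), ("/N", "-"), ("/O", "."), ("/P", "/"), ("0", "0"), ("1", "1"), ("2", "2"), ("3", "3"), ("4", "4"), ("5", "5"), ("6", "6"), ("7", "7"), ("8", "8"), ("9", "9"), ("/Z", ":"), ("%F", ";"), ("%G", "<"), ("%H", "="), ("%I", ">"), ("%J", "?"), ("%V", "@"), ("A", "A"), ("B", "B"), ("C", "C"), ("D", "D"), ("E", "E"), ("F", "F"), ("G", "G"), ("H", "H"), ("I", "I"), ("J", "J"), ("K", "K"), ("L", "L"), ("M", "M"), ("N", "N"), ("O", "O"), ("P", "P"), ("Q", "Q"), ("R", "R"), ("S", "S"), ("T", "T"), ("U", "U"), ("V", "V"), ("W", "W"), ("X", "X"), ("Y", "Y"), ("Z", "Z"), ("%K", "["), ("%L", "\\"),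 ("%M", "]"), ("%N", "^"), ("%O", "_"), ("%W", "`"), ("+A", "a"), ("+B", "b"), ("+C", "c"), ("+D", "d"), ("+E", "e"), ("+F", "f"), ("+G", "g"), ("+H", "h"), ("+I", "i"), ("+J", "j"), ("+K", "k"), ("+L", "l"), ("+M", "m"), ("+N", "n"), ("+O", "o"), ("+P", "p"), ("+Q", "q"), ("+R", "r"), ("+S", "s"), ("+T", "t"), ("+U", "u"), ("+V", "v"), ("+W", "w"), ("+X", "x"), ("+Y", "y"), ("+Z", "z"), ("%P", "{"), ("%Q", "|"), ("%R", "}"), ("%S", "~")]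

theorem revA_eq : revA = revLit := by decide

-- boolean per-character checks, verified once over all 98 domain codes by `decide`
def singleOK (n : Nat) : Bool :=
  let c := Char.ofNat n
  (revLit.contains (String.ofList [c])
      == decide (('0' ≤ c ∧ c ≤ '9') ∨ ('A' ≤ c ∧ c ≤ 'Z')))
    && (!revLit.contains (String.ofList [c])
      || (revLit.getD (String.ofList [c]) "" == String.ofList [c]))

def pairOK (p : Char) (n : Nat) : Bool :=
  let d := Char.ofNat n
  (revLit.contains (String.ofList [p, d]) == (decodePairB p d).isSome)
    && ((decodePairB p d).elim true
      (fun x => revLit.getD (String.ofList [p, d]) "" == String.ofList [x]))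

theorem singleOK_all : domNatList.all singleOK = true := by decide

theorem pairOK_all : (['/', '%', '+'].all fun p => domNatList.all (pairOK p)) = true := by
  decide

-- single-character lookup in A's reverse map agrees with B's range test
theorem single_char_lemma (c : Char) (h : pvDomChar c = true) :
    (revA.contains (String.ofList [c]) =
        decide (('0' ≤ c ∧ c ≤ '9') ∨ ('A' ≤ c ∧ c ≤ 'Z'))) ∧
      (revA.contains (String.ofList [c]) = true →
        revA.getD (String.ofList [c]) "" = String.ofList [c]) := by
  apply dom_char_cases c h
  intro n hn
  have hOK := List.all_eq_true.mp singleOK_all n hn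
  simp only [singleOK, Bool.and_eq_true, beq_iff_eq, Bool.or_eq_true,
    Bool.not_eq_true'] at hOK
  rw [revA_eq]
  refine ⟨hOK.1, fun hc => ?_⟩
  rcases hOK.2 with h0 | h1
  · rw [hc] at h0; cases h0
  · exact h1

-- two-character lookup with a shift head agrees with B's arithmetic decoder
theorem pair_char_lemma (p : Char) (hp : p = '/' ∨ p = '%' ∨ p = '+')
    (d : Char) (hd : pvDomChar d = true) :
    (revA.contains (String.ofList [p, d]) = (decodePairB p d).isSome) ∧
      (∀ x, decodePairB p d = some x →
        revA.getD (String.ofList [p, d]) "" = String.ofList [x]) := by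
  apply dom_char_cases d hd
  intro n hn
  have hmem : p ∈ ['/', '%', '+'] := by rcases hp with rfl | rfl | rfl <;> simp
  have hOK := List.all_eq_true.mp (List.all_eq_true.mp pairOK_all p hmem) n hn
  simp only [pairOK, Bool.and_eq_true, beq_iff_eq] at hOK
  rw [revA_eq]
  refine ⟨hOK.1, fun x hx => ?_⟩
  have h2 := hOK.2
  rw [hx] at h2
  simpa using h2

-- every two-character key of the reverse map starts with '/', '%' or '+'
def keyHead (s : String) : Option Char :=
  match s.toList with
  | [a, _] => some a
  | _ => none

theorem two_char_key_shift (c d : Char)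
    (h : revA.contains (String.ofList [c, d]) = true) :
    c = '/' ∨ c = '%' ∨ c = '+' := by
  rw [PySem.Dict.contains_iff_mem_keys, revA_eq] at h
  have hmem : c ∈ revLit.keys.filterMap keyHead :=
    List.mem_filterMap.mpr ⟨String.ofList [c, d], h, by simp [keyHead]⟩
  have e : revLit.keys.filterMap keyHead =
      List.replicate 17 '/' ++ List.replicate 12 '%' ++ List.replicate 26 '+' ++
        List.replicate 4 '%' := by decide
  rw [e] at hmem
  simp at hmem
  tauto

-- for a non-shift head, B's pair decoder returns none
theorem decodePairB_none (c d : Char) (hc : ¬ (c = '/' ∨ c = '%' ∨ c = '+')) :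
    decodePairB c d = none := by
  have h1 : c ≠ '/' := fun h => hc (Or.inl h)
  have h2 : c ≠ '%' := fun h => hc (Or.inr (Or.inl h))
  have h3 : c ≠ '+' := fun h => hc (Or.inr (Or.inr h))
  simp [decodePairB, h1, h2, h3]

-- the two loops agree on every domain string
theorem loop_eq (cs : List Char) (h : cs.all pvDomChar = true) : loopA cs = loopB cs := by
  induction cs using loopA.induct with
  | case1 => rfl
  | case2 c rest h1 ih =>
    have hc : pvDomChar c = true := by simp only [List.all_cons, Bool.and_eq_true] at h; exact h.1
    have hrest : rest.all pvDomChar = true := by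
      simp only [List.all_cons, Bool.and_eq_true] at h; exact h.2
    obtain ⟨e1, e2⟩ := single_char_lemma c hc
    have hP : ('0' ≤ c ∧ c ≤ '9') ∨ ('A' ≤ c ∧ c ≤ 'Z') :=
      of_decide_eq_true (e1.symm.trans h1)
    cases rest with
    | nil =>
      simp only [loopA, loopB, if_pos h1, if_pos hP, e2 h1, String.toList_ofList]
      rfl
    | cons d r =>
      simp only [loopA, loopB, if_pos h1, if_pos hP, e2 h1, String.toList_ofList]
      rw [ih hrest]
      rfl
  | case3 c h1 d rest' h2 ih =>
    have hc : pvDomChar c = true := by simp only [List.all_cons, Bool.and_eq_true] at h; exact h.1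
    have hd : pvDomChar d = true := by simp only [List.all_cons, Bool.and_eq_true] at h; exact h.2.1
    have hrest : rest'.all pvDomChar = true := by
      simp only [List.all_cons, Bool.and_eq_true] at h; exact h.2.2
    obtain ⟨e1, _⟩ := single_char_lemma c hc
    have hcf : revA.contains (String.ofList [c]) = false := Bool.eq_false_iff.mpr h1
    have hPf : ¬ (('0' ≤ c ∧ c ≤ '9') ∨ ('A' ≤ c ∧ c ≤ 'Z')) :=
      of_decide_eq_false (e1 ▸ hcf)
    have hshift : c = '/' ∨ c = '%' ∨ c = '+' := two_char_key_shift c d h2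
    obtain ⟨p1, p2⟩ := pair_char_lemma c hshift d hd
    obtain ⟨x, hx⟩ := Option.isSome_iff_exists.mp (p1 ▸ h2)
    simp only [loopA, loopB, if_neg h1, if_neg hPf, if_pos h2, hx, p2 x hx,
      String.toList_ofList]
    rw [ih hrest]
    rfl
  | case4 c h1 d rest' h2 ih =>
    have hc : pvDomChar c = true := by simp only [List.all_cons, Bool.and_eq_true] at h; exact h.1
    have hd : pvDomChar d = true := by simp only [List.all_cons, Bool.and_eq_true] at h; exact h.2.1
    have hrest : (d :: rest').all pvDomChar = true := by
      simp only [List.all_cons, Bool.and_eq_true] at h ⊢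
      exact h.2
    obtain ⟨e1, _⟩ := single_char_lemma c hc
    have hcf : revA.contains (String.ofList [c]) = false := Bool.eq_false_iff.mpr h1
    have hPf : ¬ (('0' ≤ c ∧ c ≤ '9') ∨ ('A' ≤ c ∧ c ≤ 'Z')) :=
      of_decide_eq_false (e1 ▸ hcf)
    have hc2f : revA.contains (String.ofList [c, d]) = false := Bool.eq_false_iff.mpr h2
    have hnone : decodePairB c d = none := by
      by_cases hshift : c = '/' ∨ c = '%' ∨ c = '+'
      · obtain ⟨p1, _⟩ := pair_char_lemma c hshift d hd
        have hs : (decodePairB c d).isSome = false := p1 ▸ hc2f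
        exact Option.not_isSome_iff_eq_none.mp (by simp [hs])
      · exact decodePairB_none c d hshift
    simp only [loopA, loopB, if_neg h1, if_neg hPf, if_neg h2, hnone]
    rw [ih hrest]
  | case5 c h1 ih =>
    have hc : pvDomChar c = true := by simp only [List.all_cons, Bool.and_eq_true] at h; exact h.1
    obtain ⟨e1, _⟩ := single_char_lemma c hc
    have hcf : revA.contains (String.ofList [c]) = false := Bool.eq_false_iff.mpr h1
    have hPf : ¬ (('0' ≤ c ∧ c ≤ '9') ∨ ('A' ≤ c ∧ c ≤ 'Z')) :=
      of_decide_eq_false (e1 ▸ hcf)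
    simp only [loopA, loopB, if_neg h1, if_neg hPf]

-- ===== VERDICT (by name: the statement is the Claim_ definition above) =====
theorem decode_full_ascii_spec : Claim_equal_decode_full_ascii := by
  intro s hdom
  unfold Spec_decode_full_ascii decode_full_ascii decode_full_ascii_alt
  rw [loop_eq s.toList hdom]
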